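-- pv_equiv track=rewrite | github.com/RhodianVX/BelajarCPC | Latihan CP/text.py | find_numbers_recursive
-- ===== SOURCE A (Python) =====
-- def find_numbers_recursive(random, numberArray, index=0, result=""):
--     # Hentikan rekursi jika semua karakter sudah berubah menjadi 'x'
--     if all(c == 'x' for c in random):
--         return result.strip()  # Hapus spasi berlebih di akhir
--
--     # Hentikan jika indeks sudah melewati batas array numberArray
--     if index >= len(numberArray):
--         return result.strip()
--
--     temp_random = list(random)  # Ubah string menjadi list untuk memodifikasi karakter
--     word = numberArray[index]  # Ambil kata dari numberArray
--     temp_count = temp_random[:]  # Salinan untuk pengecekan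
--
--     # Periksa apakah semua karakter dalam kata tersedia dalam random
--     for char in word:
--         if char in temp_count:
--             temp_count[temp_count.index(char)] = 'x'  # Gantikan karakter pertama yang cocok dengan 'x'
--         else:
--             # Jika karakter tidak ditemukan, lanjutkan ke indeks berikutnya
--             return find_numbers_recursive(random, numberArray, index + 1, result)
--
--     # Jika kata ditemukan, ubah karakter dalam random menjadi 'x' dan ulangi dari index 0
--     random = "".join(temp_count)
--     result += word + " "  # Tambahkan angka ke hasil
--
--     return find_numbers_recursive(random, numberArray, 0, result)  # Restart dari index 0
-- ===== SOURCE B (Python) =====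
-- def find_numbers_recursive(random, numberArray, index=0, result=""):
--     # Pool of characters still available; a letter 'x' in `random` marks a
--     # slot that has already been consumed.
--     pool = [c for c in random if c != 'x']
--     i, out = index, result
--     while pool and i < len(numberArray):
--         word = numberArray[i]
--         if all(word.count(c) <= pool.count(c) for c in word):
--             for c in word:
--                 pool.remove(c)
--             out += word + " "
--             i = 0
--         else:
--             i += 1
--     return out.strip()
-- ===== Notes on version B (the rewrite author's own statement) =====
-- stated objective: simpler
-- what changed: A recursively keeps the whole string, masking consumed characters with 'x' via per-character `in`/`.index` scans on a mutated copy and rebuilding the string each match; B is an iterative loop over a shrinking pool list, deciding a whole-word match by count comparison (word.count(c) <= pool.count(c)) and then removing the matched characters. …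
-- outside the precondition, e.g. on find_numbers_recursive('xa', ['xa'], 0, ''): A returns 'xa', B returns ''; on find_numbers_recursive('a', ['a', ''], 0, ''): A returns 'a', B returns 'a'; on find_numbers_recursive('a', ['', 'a'], 0, ''): A raises RecursionError, B does not finish within the time limit
import Mathlib
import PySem

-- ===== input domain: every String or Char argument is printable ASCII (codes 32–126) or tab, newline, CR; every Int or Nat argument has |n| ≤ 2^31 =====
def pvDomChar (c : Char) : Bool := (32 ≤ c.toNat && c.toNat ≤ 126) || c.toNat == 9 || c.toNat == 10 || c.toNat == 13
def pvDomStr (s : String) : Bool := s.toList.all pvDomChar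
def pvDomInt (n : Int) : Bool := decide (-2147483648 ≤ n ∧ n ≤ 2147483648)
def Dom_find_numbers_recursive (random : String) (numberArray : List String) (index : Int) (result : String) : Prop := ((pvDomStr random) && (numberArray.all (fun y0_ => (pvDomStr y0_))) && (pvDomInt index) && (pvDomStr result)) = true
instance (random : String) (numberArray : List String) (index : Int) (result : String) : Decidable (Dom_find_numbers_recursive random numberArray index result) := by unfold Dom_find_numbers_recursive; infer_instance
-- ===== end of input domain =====

-- B replaces A's recursion over an 'x'-masked string (per-character `in`/`.index` mutation of a
-- copied list) by an iterative loop over a shrinking pool list with a count-comparison match test;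
-- same return value on Pre_ (alternative decomposition, simpler code).  Both Python versions can
-- fail to terminate outside Pre_; the ports use a fuel bound that is sufficient on Pre_.

-- ===== PORT A =====
-- the for-loop over `word`: `char in temp_count` + `temp_count[temp_count.index(char)] = 'x'`
-- (index? tc c is some exactly when `char in temp_count`)
def pvMatchA : List Char → List Char → Option (List Char)
  | [], tc => some tc
  | c :: cs, tc =>
      match PySem.List.index? tc c with
      | some j => pvMatchA cs (tc.set j 'x')
      | none => none

-- fuel-indexed transliteration of A's recursion (fuel 0 is never reached on Pre_ inputs)
def pvFuelA : Nat → String → List String → Int → String → String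
  | 0, _, _, _, result => PySem.Str.strip result
  | f+1, random, numberArray, index, result =>
    if random.toList.all (fun c => c == 'x') then PySem.Str.strip result
    else if (numberArray.length : Int) ≤ index then PySem.Str.strip result
    else
      match PySem.List.pyGet? numberArray index with
      | none => PySem.Str.strip result   -- IndexError in Python; excluded by Pre_
      | some word =>
        match pvMatchA word.toList random.toList with
        | none => pvFuelA f random numberArray (index + 1) result
        | some tc => pvFuelA f (String.ofList tc) numberArray 0 (result ++ word ++ " ")

def find_numbers_recursive (random : String) (numberArray : List String) (index : Int) (result : String) : String :=
  pvFuelA (((random.toList.countP fun c => c != 'x') + 2) * (numberArray.length + 2)) random numberArray index result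

-- ===== PORT B =====
-- Source B's match test: all(word.count(c) <= pool.count(c) for c in word)
def pvCountOkB (w pool : List Char) : Bool := w.all (fun c => decide (w.count c ≤ pool.count c))

-- Source B's removal loop `for c in word: pool.remove(c)`; List.erase removes the first occurrence,
-- exact whenever c is present (guaranteed by the preceding count test on Pre_ inputs)
def pvRemoveB (pool : List Char) (w : List Char) : List Char := w.foldl (fun p c => p.erase c) pool

-- fuel-indexed transliteration of Source B's while-loop (fuel 0 is never reached on Pre_ inputs)
def pvFuelB : Nat → List Char → List String → Int → String → String
  | 0, _, _, _, out => PySem.Str.strip out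
  | f+1, pool, numberArray, i, out =>
    if !pool.isEmpty && decide (i < (numberArray.length : Int)) then
      match PySem.List.pyGet? numberArray i with
      | none => PySem.Str.strip out   -- IndexError in Python; excluded by Pre_
      | some word =>
        if pvCountOkB word.toList pool then
          pvFuelB f (pvRemoveB pool word.toList) numberArray 0 (out ++ word ++ " ")
        else pvFuelB f pool numberArray (i + 1) out
    else PySem.Str.strip out

def find_numbers_recursive_alt (random : String) (numberArray : List String) (index : Int) (result : String) : String :=
  pvFuelB (((random.toList.filter (fun c => c != 'x')).length + 2) * (numberArray.length + 2))
    (random.toList.filter (fun c => c != 'x')) numberArray index result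

-- ===== PRECONDITION & SPEC =====
-- Pre_ excludes inputs (reachable with a live pool and an in-range index) whose array contains an
-- empty word (A recurses forever: RecursionError), an index below -len(numberArray) (IndexError
-- via negative indexing), and words containing the letter 'x': A marks consumed slots in-band
-- with 'x', so a literal 'x' in a word can match an already-consumed slot — a representation
-- artefact corner where either behaviour is defensible (B treats 'x' slots as consumed).  The
-- empty-word/termination reason is an over-approximation, so some terminating inputs are excluded too.
def Pre_find_numbers_recursive (random : String) (numberArray : List String) (index : Int) (result : String) : Prop :=
  (random.toList.all (fun c => c == 'x')) = true ∨
  (numberArray.length : Int) ≤ index ∨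
  (-(numberArray.length : Int) ≤ index ∧
    (numberArray.all (fun w => !w.toList.isEmpty && w.toList.all (fun c => c != 'x'))) = true)
instance (random : String) (numberArray : List String) (index : Int) (result : String) : Decidable (Pre_find_numbers_recursive random numberArray index result) := by unfold Pre_find_numbers_recursive; infer_instance

def pvWitness_find_numbers_recursive : String × List String × Int × String := ("ab", ["ba"], 0, "")

def Spec_find_numbers_recursive (random : String) (numberArray : List String) (index : Int) (result : String) (out : String) : Prop := out = find_numbers_recursive_alt random numberArray index result
instance (random : String) (numberArray : List String) (index : Int) (result : String) (out : String) : Decidable (Spec_find_numbers_recursive random numberArray index result out) := by unfold Spec_find_numbers_recursive; infer_instance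

-- ===== CLAIM (what is proved, stated in full; the proofs are below) =====
def Claim_equal_find_numbers_recursive : Prop := ∀ (random : String) (numberArray : List String) (index : Int) (result : String), Dom_find_numbers_recursive random numberArray index result → Pre_find_numbers_recursive random numberArray index result → Spec_find_numbers_recursive random numberArray index result (find_numbers_recursive random numberArray index result)

-- ===== LEMMAS AND PROOFS =====

-- abstract masking: replace the first u(c) occurrences of each character c ≠ 'x' by 'x'
def pvMaskN : List Char → (Char → Nat) → List Char
  | [], _ => []
  | a :: rs, u =>
    if a ≠ 'x' ∧ 0 < u a then 'x' :: pvMaskN rs (fun d => if d = a then u d - 1 else u d)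
    else a :: pvMaskN rs u

theorem pvCount_cons_ne {c b : Char} (rs : List Char) (hne : ¬ c = b) :
    List.count c (b :: rs) = List.count c rs := by
  rw [List.count_cons]
  simp [hne, show b ≠ c from fun h => hne h.symm]

theorem pvMaskN_congr (r : List Char) (u v : Char → Nat) (h : ∀ c, c ≠ 'x' → u c = v c) :
    pvMaskN r u = pvMaskN r v := by
  induction r generalizing u v with
  | nil => rfl
  | cons a rs ih =>
    simp only [pvMaskN]
    by_cases ha : a ≠ 'x' ∧ 0 < u a
    · have hav : a ≠ 'x' ∧ 0 < v a := ⟨ha.1, by rw [← h a ha.1]; exact ha.2⟩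
      rw [if_pos ha, if_pos hav]
      refine congrArg _ (ih _ _ ?_)
      intro c hc
      by_cases hca : c = a
      · subst hca; simp [h c hc]
      · simp [hca, h c hc]
    · have hav : ¬ (a ≠ 'x' ∧ 0 < v a) := by
        intro hv; exact ha ⟨hv.1, by rw [h a hv.1]; exact hv.2⟩
      rw [if_neg ha, if_neg hav]
      exact congrArg _ (ih _ _ h)

theorem pvMaskN_zero (r : List Char) : pvMaskN r (fun _ => 0) = r := by
  induction r with
  | nil => rfl
  | cons a rs ih => simp [pvMaskN, ih]

theorem pvContains_maskN (r : List Char) (u : Char → Nat) (c : Char) (hc : c ≠ 'x') :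
    (pvMaskN r u).contains c = decide (u c < r.count c) := by
  induction r generalizing u with
  | nil => simp [pvMaskN]
  | cons a rs ih =>
    simp only [pvMaskN]
    by_cases ha : a ≠ 'x' ∧ 0 < u a
    · rw [if_pos ha, List.contains_cons]
      have hxc : (c == 'x') = false := by simp [hc]
      rw [hxc, Bool.false_or, ih]
      by_cases hca : c = a
      · subst hca
        have hpos := ha.2
        have h1 : (if c = c then u c - 1 else u c) = u c - 1 := if_pos rfl
        rw [h1, List.count_cons_self, decide_eq_decide]
        omega
      · have h1 : (if c = a then u c - 1 else u c) = u c := if_neg hca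
        rw [h1, pvCount_cons_ne rs hca]
    · rw [if_neg ha, List.contains_cons]
      by_cases hca : c = a
      · subst hca
        have hu : u c = 0 := by
          rcases Decidable.not_and_iff_not_or_not.mp ha with h1 | h2
          · exact absurd hc (by simpa using h1)
          · omega
        simp [hu, List.count_cons_self]
      · have hbe : (c == a) = false := by simp [hca]
        rw [hbe, Bool.false_or, ih, pvCount_cons_ne rs hca]

theorem pvSet_index_maskN (r : List Char) (u : Char → Nat) (c : Char) (j : Nat)
    (hc : c ≠ 'x') (hlt : u c < r.count c)
    (h : PySem.List.index? (pvMaskN r u) c = some j) :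
    (pvMaskN r u).set j 'x' = pvMaskN r (fun d => if d = c then u d + 1 else u d) := by
  induction r generalizing u j with
  | nil => simp at hlt
  | cons a rs ih =>
    by_cases ha : a ≠ 'x' ∧ 0 < u a
    · simp only [pvMaskN, if_pos ha] at h ⊢
      rw [PySem.List.index?_cons_of_ne _ (Ne.symm hc)] at h
      rcases Option.map_eq_some_iff.mp h with ⟨j', hj', rfl⟩
      have hvpos : a ≠ 'x' ∧ 0 < (fun d => if d = c then u d + 1 else u d) a := by
        refine ⟨ha.1, ?_⟩
        by_cases hac : a = c <;> simp [hac] <;> omega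
      rw [if_pos hvpos]
      have hlt' : (fun d => if d = a then u d - 1 else u d) c < rs.count c := by
        by_cases hac : a = c
        · subst hac
          have hp := ha.2
          rw [List.count_cons_self] at hlt
          show (if a = a then u a - 1 else u a) < List.count a rs
          rw [if_pos rfl]
          omega
        · rw [pvCount_cons_ne rs (fun hh => hac hh.symm)] at hlt
          simpa [show ¬ c = a from fun hh => hac hh.symm] using hlt
      rw [List.set_cons_succ, ih _ j' hlt' hj']
      refine congrArg (List.cons 'x') (congrArg _ (funext fun d => ?_))
      have hp := ha.2
      split_ifs <;> subst_vars <;> omega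
    · simp only [pvMaskN, if_neg ha] at h ⊢
      by_cases hac : a = c
      · subst hac
        have hu0 : u a = 0 := by
          rcases Decidable.not_and_iff_not_or_not.mp ha with h1 | h2
          · exact absurd hc (by simpa using h1)
          · omega
        rw [PySem.List.index?_cons_self a (pvMaskN rs u)] at h
        have hj0 : j = 0 := by injection h with h'; omega
        subst hj0
        have hvpos : a ≠ 'x' ∧ 0 < (fun d => if d = a then u d + 1 else u d) a := by
          exact ⟨hc, by simp⟩
        rw [if_pos hvpos, List.set_cons_zero]
        refine congrArg (List.cons 'x') (congrArg _ (funext fun d => ?_))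
        split_ifs <;> subst_vars <;> omega
      · rw [PySem.List.index?_cons_of_ne _ hac] at h
        rcases Option.map_eq_some_iff.mp h with ⟨j', hj', rfl⟩
        have hvneg : ¬ (a ≠ 'x' ∧ 0 < (fun d => if d = c then u d + 1 else u d) a) := by
          intro hv
          exact ha ⟨hv.1, by simpa [hac] using hv.2⟩
        rw [if_neg hvneg, List.set_cons_succ]
        have hlt' : u c < rs.count c := by
          rwa [pvCount_cons_ne rs (fun hh => hac hh.symm)] at hlt
        rw [ih u j' hlt' hj']

-- A's inner word loop, characterised for words without 'x'
theorem pvMatchA_eq (w : List Char) : ∀ (r : List Char) (u : Char → Nat),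
    (∀ c ∈ w, c ≠ 'x') → (∀ d, u d ≤ r.count d) →
    pvMatchA w (pvMaskN r u) =
      if (∀ c ∈ w, u c + w.count c ≤ r.count c) then
        some (pvMaskN r (fun c => u c + w.count c)) else none := by
  induction w with
  | nil =>
    intro r u _ _
    rw [if_pos (by intro c hc; exact absurd hc (List.not_mem_nil))]
    exact congrArg some (pvMaskN_congr r _ _ (fun c _ => by simp))
  | cons c cs ih =>
    intro r u hw hb
    have hc : c ≠ 'x' := hw c List.mem_cons_self
    have hcont := pvContains_maskN r u c hc
    by_cases hlt : u c < r.count c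
    · have hmem : c ∈ pvMaskN r u := by
        have : (pvMaskN r u).contains c = true := by rw [hcont]; simpa using hlt
        simpa [List.contains_eq_mem] using this
      obtain ⟨j, hj⟩ := Option.isSome_iff_exists.mp ((PySem.List.index?_isSome_iff _ _).mpr hmem)
      simp only [pvMatchA, hj]
      rw [pvSet_index_maskN r u c j hc hlt hj]
      have hb' : ∀ d, (fun d => if d = c then u d + 1 else u d) d ≤ r.count d := by
        intro d
        by_cases hdc : d = c
        · subst hdc; simpa using hlt
        · simpa [hdc] using hb d
      rw [ih r _ (fun d hd => hw d (List.mem_cons_of_mem _ hd)) hb']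
      have hfun : ∀ d, (if d = c then u d + 1 else u d) + cs.count d = u d + (c :: cs).count d := by
        intro d
        by_cases hdc : d = c
        · subst hdc; rw [List.count_cons_self]; simp; omega
        · rw [pvCount_cons_ne cs hdc]; simp [hdc]
      have hiff : (∀ d ∈ cs, (if d = c then u d + 1 else u d) + cs.count d ≤ r.count d) ↔
          (∀ d ∈ c :: cs, u d + (c :: cs).count d ≤ r.count d) := by
        constructor
        · intro h d hd
          rcases List.mem_cons.mp hd with rfl | hd'
          · by_cases hcs : d ∈ cs
            · rw [← hfun d]; exact h d hcs
            · rw [List.count_cons_self, List.count_eq_zero_of_not_mem hcs]; omega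
          · rw [← hfun d]; exact h d hd'
        · intro h d hd
          rw [hfun d]; exact h d (List.mem_cons_of_mem _ hd)
      rw [if_congr hiff rfl rfl]
      by_cases hcnd : ∀ d ∈ c :: cs, u d + (c :: cs).count d ≤ r.count d
      · rw [if_pos hcnd, if_pos hcnd]
        exact congrArg some (pvMaskN_congr r _ _ (fun d _ => hfun d))
      · rw [if_neg hcnd, if_neg hcnd]
    · have hnm : c ∉ pvMaskN r u := by
        intro hm
        have : (pvMaskN r u).contains c = true := by simpa [List.contains_eq_mem] using hm
        rw [hcont] at this
        exact hlt (by simpa using this)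
      have hnone : PySem.List.index? (pvMaskN r u) c = none :=
        (PySem.List.index?_eq_none_iff _ _).mpr hnm
      simp only [pvMatchA, hnone]
      rw [if_neg ?_]
      intro h
      have h1 := h c List.mem_cons_self
      rw [List.count_cons_self] at h1
      omega

-- composing two masks is masking by the sum
theorem pvMaskN_comp (r : List Char) : ∀ (u v : Char → Nat),
    pvMaskN (pvMaskN r u) v = pvMaskN r (fun c => u c + v c) := by
  induction r with
  | nil => intro u v; rfl
  | cons a rs ih =>
    intro u v
    by_cases ha : a ≠ 'x' ∧ 0 < u a
    · simp only [pvMaskN, if_pos ha]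
      rw [if_neg (by simp), ih]
      have hsum : a ≠ 'x' ∧ 0 < u a + v a := ⟨ha.1, by omega⟩
      rw [if_pos hsum]
      refine congrArg (List.cons 'x') (pvMaskN_congr rs _ _ (fun d _ => ?_))
      have := ha.2
      by_cases hda : d = a <;> simp [hda] <;> omega
    · simp only [pvMaskN, if_neg ha]
      by_cases hax : a = 'x'
      · subst hax
        rw [if_neg (by simp), if_neg (by simp), ih]
      · have hu0 : u a = 0 := by
          rcases Decidable.not_and_iff_not_or_not.mp ha with h1 | h2
          · exact absurd hax (by simpa using h1)
          · omega
        by_cases hv : 0 < v a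
        · rw [if_pos ⟨hax, hv⟩, ih]
          have hsum : a ≠ 'x' ∧ 0 < u a + v a := ⟨hax, by omega⟩
          rw [if_pos hsum]
          refine congrArg (List.cons 'x') (pvMaskN_congr rs _ _ (fun d _ => ?_))
          by_cases hda : d = a <;> simp [hda] <;> omega
        · rw [if_neg (by intro h; exact hv h.2), ih]
          rw [if_neg (by intro h; have := h.2; omega)]

-- erasing one c from the 'x'-free pool = masking the first c and re-filtering
theorem pvErase_filter (r : List Char) (c : Char) (hc : c ≠ 'x') :
    (r.filter (fun a => a != 'x')).erase c =
      (pvMaskN r (fun d => if d = c then 1 else 0)).filter (fun a => a != 'x') := by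
  induction r with
  | nil => rfl
  | cons a rs ih =>
    by_cases hax : a = 'x'
    · subst hax
      simp only [List.filter_cons, pvMaskN]
      rw [if_neg (by simp)]
      simpa using ih
    · have hkeep : (a != 'x') = true := by simpa using hax
      by_cases hac : a = c
      · subst hac
        simp only [List.filter_cons, pvMaskN]
        rw [hkeep, if_pos rfl, if_pos ⟨hax, by simp⟩, List.erase_cons_head]
        rw [pvMaskN_congr rs _ (fun _ => 0) (fun d _ => by by_cases hda : d = a <;> simp [hda]),
            pvMaskN_zero]
        rw [List.filter_cons, if_neg (by simp)]
      · simp only [List.filter_cons, pvMaskN]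
        rw [hkeep, if_pos rfl, if_neg (by intro h; exact hac (by simpa [hac] using h.2)),
            List.erase_cons_tail (by simpa using hac), List.filter_cons, hkeep]
        simp only [if_true]
        rw [ih]

-- removing an 'x'-free word from the 'x'-free pool = masking by its counts and re-filtering
theorem pvRemoveB_filter (w : List Char) : ∀ (r : List Char), (∀ c ∈ w, c ≠ 'x') →
    pvRemoveB (r.filter (fun a => a != 'x')) w =
      (pvMaskN r (fun c => w.count c)).filter (fun a => a != 'x') := by
  induction w with
  | nil =>
    intro r _
    show r.filter _ = _
    rw [pvMaskN_congr r _ (fun _ => 0) (fun c _ => by simp), pvMaskN_zero]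
  | cons c cs ih =>
    intro r hw
    have hc : c ≠ 'x' := hw c List.mem_cons_self
    show pvRemoveB ((r.filter (fun a => a != 'x')).erase c) cs = _
    rw [pvErase_filter r c hc, ih _ (fun d hd => hw d (List.mem_cons_of_mem _ hd)), pvMaskN_comp]
    refine congrArg _ (pvMaskN_congr r _ _ (fun d _ => ?_))
    by_cases hdc : d = c
    · subst hdc; rw [List.count_cons_self]; simp; omega
    · rw [pvCount_cons_ne cs hdc]; simp [hdc]

-- the loop guards agree: `all == 'x'` on the string ↔ the filtered pool is empty
theorem pvAllx_filter (l : List Char) :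
    (l.all (fun c => c == 'x')) = (l.filter (fun c => c != 'x')).isEmpty := by
  induction l with
  | nil => rfl
  | cons a rs ih =>
    simp only [List.all_cons, List.filter_cons]
    by_cases hax : a = 'x'
    · subst hax; simpa using ih
    · have h1 : (a == 'x') = false := by simpa using hax
      have h2 : (a != 'x') = true := by simpa using hax
      rw [h1, h2]
      simp

-- counting an 'x'-free character in the filtered pool
theorem pvCount_filter (r : List Char) (c : Char) (hc : c ≠ 'x') :
    (r.filter (fun a => a != 'x')).count c = r.count c := by
  induction r with
  | nil => rfl
  | cons a rs ih =>
    rw [List.filter_cons]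
    by_cases hax : a = 'x'
    · subst hax
      rw [if_neg (by simp), ih, pvCount_cons_ne rs hc]
    · rw [if_pos (by simpa using hax)]
      by_cases hca : c = a
      · subst hca; rw [List.count_cons_self, List.count_cons_self, ih]
      · rw [pvCount_cons_ne _ hca, pvCount_cons_ne rs hca, ih]

-- one attempted word, A's test vs B's test, for an 'x'-free word
theorem pvStep (w r : List Char) (hw : ∀ c ∈ w, c ≠ 'x') :
    pvMatchA w r =
      if pvCountOkB w (r.filter (fun a => a != 'x')) then
        some (pvMaskN r (fun c => w.count c)) else none := by
  have h0 : pvMatchA w r = pvMatchA w (pvMaskN r (fun _ => 0)) := by rw [pvMaskN_zero]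
  rw [h0, pvMatchA_eq w r (fun _ => 0) hw (fun d => Nat.zero_le _)]
  have hiff : (∀ c ∈ w, 0 + w.count c ≤ r.count c) ↔
      pvCountOkB w (r.filter (fun a => a != 'x')) = true := by
    unfold pvCountOkB
    rw [List.all_eq_true]
    constructor
    · intro h c hcw
      have := h c hcw
      rw [decide_eq_true_eq, pvCount_filter r c (hw c hcw)]
      omega
    · intro h c hcw
      have := h c hcw
      rw [decide_eq_true_eq, pvCount_filter r c (hw c hcw)] at this
      omega
  by_cases hcnd : ∀ c ∈ w, 0 + w.count c ≤ r.count c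
  · rw [if_pos hcnd, if_pos (hiff.mp hcnd)]
    exact congrArg some (pvMaskN_congr r _ _ (fun d _ => by omega))
  · rw [if_neg hcnd, if_neg (fun hb => hcnd (hiff.mpr hb))]

-- the two loops run in lockstep (B's pool is the filtered image of A's string)
theorem pvLock (arr : List String) (hw : ∀ w ∈ arr, w ≠ "" ∧ (∀ c ∈ w.toList, c ≠ 'x')) :
    ∀ (f : Nat) (random : String) (i : Int) (res : String),
    pvFuelA f random arr i res = pvFuelB f (random.toList.filter (fun c => c != 'x')) arr i res := by
  intro f
  induction f with
  | zero => intro random i res; rfl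
  | succ f ih =>
    intro random i res
    simp only [pvFuelA, pvFuelB]
    by_cases h1 : (random.toList.all fun c => c == 'x') = true
    · have hemp : (random.toList.filter (fun c => c != 'x')).isEmpty = true := by
        rw [← pvAllx_filter]; exact h1
      rw [if_pos h1, hemp]
      simp
    · have hne : (!(random.toList.filter (fun c => c != 'x')).isEmpty) = true := by
        rw [← pvAllx_filter]
        simpa using h1
      rw [if_neg h1, hne, Bool.true_and]
      by_cases h2 : (arr.length : Int) ≤ i
      · rw [if_pos h2, if_neg (by simp; omega)]
      · rw [if_neg h2, if_pos (by simp; omega)]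
        cases hget : PySem.List.pyGet? arr i with
        | none => rfl
        | some word =>
          have hword := hw word (PySem.List.mem_of_pyGet?_eq_some _ hget)
          dsimp only
          rw [pvStep word.toList random.toList hword.2]
          by_cases hm : pvCountOkB word.toList (random.toList.filter (fun a => a != 'x')) = true
          · rw [if_pos hm, if_pos hm]
            dsimp only
            rw [ih (String.ofList (pvMaskN random.toList (fun c => word.toList.count c))) 0 (res ++ word ++ " ")]
            rw [String.toList_ofList, pvRemoveB_filter word.toList random.toList hword.2]
          · rw [if_neg hm, if_neg hm]
            exact ih random (i + 1) res

theorem pvFuelSucc (x y : Nat) : ∃ f, (x + 2) * (y + 2) = f + 1 :=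
  ⟨(x + 2) * (y + 2) - 1, (Nat.sub_add_cancel (Nat.one_le_iff_ne_zero.mpr
    (Nat.pos_iff_ne_zero.mp (Nat.mul_pos (by omega) (by omega))))).symm⟩

-- one step when the loop exits immediately (all-'x' pool or index out of bounds)
theorem pvTriv (f : Nat) (random : String) (arr : List String) (i : Int) (res : String)
    (h : (random.toList.all fun c => c == 'x') = true ∨ (arr.length : Int) ≤ i) :
    pvFuelA (f + 1) random arr i res = pvFuelB (f + 1) (random.toList.filter (fun c => c != 'x')) arr i res := by
  simp only [pvFuelA, pvFuelB]
  rcases h with h1 | h2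
  · have hemp : (random.toList.filter (fun c => c != 'x')).isEmpty = true := by
      rw [← pvAllx_filter]; exact h1
    rw [if_pos h1, hemp]
    simp
  · have hlt : decide (i < (arr.length : Int)) = false := by simp; omega
    rw [hlt, Bool.and_false, if_neg (show ¬ (false = true) by simp)]
    by_cases h1 : (random.toList.all fun c => c == 'x') = true
    · rw [if_pos h1]
    · rw [if_neg h1, if_pos h2]

-- ===== VERDICT (by name: the statement is the Claim_ definition above) =====
theorem find_numbers_recursive_spec : Claim_equal_find_numbers_recursive := by
  intro random arr i res _ hpre
  unfold Spec_find_numbers_recursive find_numbers_recursive find_numbers_recursive_alt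
  have hfuel : (random.toList.countP fun c => c != 'x') = (random.toList.filter (fun c => c != 'x')).length := by
    rw [List.countP_eq_length_filter]
  rw [hfuel]
  rcases hpre with h1 | h2 | h3
  · obtain ⟨f, hf⟩ := pvFuelSucc (random.toList.filter (fun c => c != 'x')).length arr.length
    rw [hf]
    exact pvTriv f random arr i res (Or.inl h1)
  · obtain ⟨f, hf⟩ := pvFuelSucc (random.toList.filter (fun c => c != 'x')).length arr.length
    rw [hf]
    exact pvTriv f random arr i res (Or.inr h2)
  · refine pvLock arr ?_ _ random i res
    intro w hwmem
    have h := List.all_eq_true.mp h3.2 w hwmem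
    simp only [Bool.and_eq_true, List.all_eq_true, Bool.not_eq_eq_eq_not, Bool.not_false] at h
    refine ⟨fun he => ?_, fun c hc => by simpa using h.2 c hc⟩
    rw [he] at h
    simp at h
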